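-- pv_equiv track=rewrite | github.com/DomVinyard/slices | skill/scripts/sync_article_hash.py | upsert_amendments_hash
-- ===== SOURCE A (Python) =====
-- def upsert_amendments_hash(frontmatter: str, new_hash: str, last_amendment: str | None) -> str:
--     lines = frontmatter.splitlines()
--     key_values: dict[str, str] = {}
--     order: list[str] = []
--
--     for line in lines:
--         if ":" not in line:
--             continue
--         key, value = line.split(":", 1)
--         key = key.strip()
--         value = value.strip()
--         if key not in order:
--             order.append(key)
--         key_values[key] = value
--
--     key_values["amendments_hash"] = f'"{new_hash}"'
--     if last_amendment is not None:
--         key_values["last_reconciled_amendment"] = f'"{last_amendment}"'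
--     # Remove stale/transient fields
--     for key in ["stale_reason", "stale_since_hash", "stale_amendment_path", "pending_reason_code",
--                  "status", "articles_hash", "stale_article_path", "resolution_started_at"]:
--         if key in key_values:
--             del key_values[key]
--
--     if "amendments_hash" not in order:
--         order.append("amendments_hash")
--     if "last_reconciled_amendment" not in order and last_amendment is not None:
--         order.append("last_reconciled_amendment")
--
--     updated: list[str] = []
--     for key in order:
--         if key in key_values:
--             updated.append(f"{key}: {key_values[key]}")
--
--     for key, value in key_values.items():
--         if key not in order:
--             updated.append(f"{key}: {value}")
--     return "\n".join(updated)
-- ===== SOURCE B (Python) =====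
-- _STALE = frozenset({"stale_reason", "stale_since_hash", "stale_amendment_path",
--                     "pending_reason_code", "status", "articles_hash",
--                     "stale_article_path", "resolution_started_at"})
--
--
-- def upsert_amendments_hash(frontmatter: str, new_hash: str, last_amendment: str | None) -> str:
--     # Flat pair list; the upserts are just pairs appended at the end: the generic
--     # "first occurrence gives the position, last occurrence gives the value" rule
--     # then reproduces both the overwrite and the append-if-new behaviour.
--     pairs = []
--     for line in frontmatter.splitlines():
--         if ":" in line:
--             k, v = line.split(":", 1)
--             pairs.append((k.strip(), v.strip()))
--     pairs.append(("amendments_hash", f'"{new_hash}"'))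
--     if last_amendment is not None:
--         pairs.append(("last_reconciled_amendment", f'"{last_amendment}"'))
--
--     keys = [k for k, _ in pairs]
--     out = []
--     for i, (k, _) in enumerate(pairs):
--         if k not in _STALE and k not in keys[:i]:
--             last_value = next(v for kk, v in reversed(pairs) if kk == k)
--             out.append(f"{k}: {last_value}")
--     return "\n".join(out)
-- ===== Notes on version B (the rewrite author's own statement) =====
-- stated objective: alternative
-- what changed: B drops A's dict+order-list machinery entirely: it works on a flat list of (key,value) pairs with the upserts simply appended, then emits each key at its first occurrence (positional filter via enumerate) with its last occurrence's value found by a reverse scan, skipping the stale keys.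
import Mathlib
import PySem

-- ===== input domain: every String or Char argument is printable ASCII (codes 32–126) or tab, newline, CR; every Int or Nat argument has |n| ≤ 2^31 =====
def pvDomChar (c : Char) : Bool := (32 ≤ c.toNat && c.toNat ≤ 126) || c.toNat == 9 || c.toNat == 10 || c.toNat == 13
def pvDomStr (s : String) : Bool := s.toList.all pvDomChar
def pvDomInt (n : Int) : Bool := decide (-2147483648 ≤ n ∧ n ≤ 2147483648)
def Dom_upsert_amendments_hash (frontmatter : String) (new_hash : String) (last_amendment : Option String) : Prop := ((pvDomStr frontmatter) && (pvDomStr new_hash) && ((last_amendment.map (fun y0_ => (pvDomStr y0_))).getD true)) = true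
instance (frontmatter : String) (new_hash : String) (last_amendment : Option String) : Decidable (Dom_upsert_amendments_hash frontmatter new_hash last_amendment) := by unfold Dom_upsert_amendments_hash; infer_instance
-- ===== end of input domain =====

-- B replaces A's dict + first-occurrence order list by a dict-free algorithm on the flat
-- pair list (upserts appended; emit each key at its first occurrence with its last value,
-- skipping stale keys); objective: alternative (same cost, no dict).

-- the fixed stale/transient keys both versions delete (A: a list literal, B: a frozenset
-- used only for membership, so the same distinct-element list is exact for both)
def pvStaleKeys : List String :=
  ["stale_reason", "stale_since_hash", "stale_amendment_path", "pending_reason_code",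
   "status", "articles_hash", "stale_article_path", "resolution_started_at"]

-- ===== PORT A =====
-- A's parse-loop body: dict of last values plus the first-occurrence order list
def pvStepA (st : PySem.Dict String String × List String) (line : String) :
    PySem.Dict String String × List String :=
  if PySem.Str.isIn ":" line then
    let parts := (PySem.Str.splitMax? line ":" 1).getD []  -- never none (sep ≠ "")
    let key := PySem.Str.strip (parts.getD 0 "")
    let value := PySem.Str.strip (parts.getD 1 "")
    (st.1.insert key value, if key ∈ st.2 then st.2 else st.2 ++ [key])
  else st

def upsert_amendments_hash (frontmatter : String) (new_hash : String) (last_amendment : Option String) : String :=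
  let lines := PySem.Str.splitlines frontmatter
  let st := lines.foldl pvStepA (PySem.Dict.empty, [])
  let kv := st.1.insert "amendments_hash" ("\"" ++ new_hash ++ "\"")
  let kv := match last_amendment with
    | some la => kv.insert "last_reconciled_amendment" ("\"" ++ la ++ "\"")
    | none => kv
  let kv := pvStaleKeys.foldl (fun d k => if d.contains k then d.erase k else d) kv
  let order := if "amendments_hash" ∈ st.2 then st.2 else st.2 ++ ["amendments_hash"]
  let order := if "last_reconciled_amendment" ∉ order ∧ last_amendment ≠ none then
      order ++ ["last_reconciled_amendment"] else order
  let updated := order.foldl (fun acc k =>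
      if kv.contains k then acc ++ [k ++ ": " ++ kv.getD k ""] else acc) []
  let updated := kv.items.foldl (fun acc p =>
      if p.1 ∈ order then acc else acc ++ [p.1 ++ ": " ++ p.2]) updated
  PySem.Str.join "\n" updated

-- ===== PORT B =====
-- B's parse loop collects the stripped (key, value) pairs of the lines with a ':'
def pvParseStep (acc : List (String × String)) (line : String) : List (String × String) :=
  if PySem.Str.isIn ":" line then
    let parts := (PySem.Str.splitMax? line ":" 1).getD []  -- never none (sep ≠ "")
    acc ++ [(PySem.Str.strip (parts.getD 0 ""), PySem.Str.strip (parts.getD 1 ""))]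
  else acc

-- next(v for kk, v in reversed(pairs) if kk == k); the generator always finds a hit when
-- k is a key of pairs, so the "" default of getD is never used on B's calls
def pvLastVal (pairs : List (String × String)) (k : String) : String :=
  (((pairs.reverse).find? (fun p => p.1 == k)).map (fun p => p.2)).getD ""

def upsert_amendments_hash_alt (frontmatter : String) (new_hash : String) (last_amendment : Option String) : String :=
  let pairs := (PySem.Str.splitlines frontmatter).foldl pvParseStep []
  let pairs := pairs ++ [("amendments_hash", "\"" ++ new_hash ++ "\"")]
  let pairs := match last_amendment with
    | some la => pairs ++ [("last_reconciled_amendment", "\"" ++ la ++ "\"")]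
    | none => pairs
  let keys := pairs.map Prod.fst
  -- enumerate yields nonnegative indices, so keys[:i] is exactly List.take i
  let out := (PySem.List.enumerate pairs 0).foldl (fun acc p =>
      if p.2.1 ∉ pvStaleKeys ∧ p.2.1 ∉ keys.take p.1.toNat then
        acc ++ [p.2.1 ++ ": " ++ pvLastVal pairs p.2.1]
      else acc) []
  PySem.Str.join "\n" out

-- ===== PRECONDITION & SPEC =====
def Spec_upsert_amendments_hash (frontmatter : String) (new_hash : String) (last_amendment : Option String) (out : String) : Prop := out = upsert_amendments_hash_alt frontmatter new_hash last_amendment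
instance (frontmatter : String) (new_hash : String) (last_amendment : Option String) (out : String) : Decidable (Spec_upsert_amendments_hash frontmatter new_hash last_amendment out) := by unfold Spec_upsert_amendments_hash; infer_instance

-- ===== CLAIM (what is proved, stated in full; the proofs are below) =====
def Claim_equal_upsert_amendments_hash : Prop := ∀ (frontmatter : String) (new_hash : String) (last_amendment : Option String), Dom_upsert_amendments_hash frontmatter new_hash last_amendment → Spec_upsert_amendments_hash frontmatter new_hash last_amendment (upsert_amendments_hash frontmatter new_hash last_amendment)

-- ===== LEMMAS AND PROOFS =====

-- proof-side helper: A's parse loop folded as a dict-only step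
def pvDictStep (d : PySem.Dict String String) (line : String) : PySem.Dict String String :=
  if PySem.Str.isIn ":" line then
    let parts := (PySem.Str.splitMax? line ":" 1).getD []
    d.insert (PySem.Str.strip (parts.getD 0 "")) (PySem.Str.strip (parts.getD 1 ""))
  else d

-- proof-side helper: ordered dedup relative to an already-seen list
def pvDedup (seen : List String) (ks : List String) : List String :=
  match ks with
  | [] => []
  | k :: t => if k ∈ seen then pvDedup seen t else k :: pvDedup (k :: seen) t

-- proof-side helper: pvDedup fused with the stale filter, as B's loop produces it
def pvNew (seen : List String) (ks : List String) : List String :=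
  match ks with
  | [] => []
  | k :: t =>
      if k ∈ seen then pvNew seen t
      else if k ∈ pvStaleKeys then pvNew (k :: seen) t
      else k :: pvNew (k :: seen) t

theorem pv_contains_eq_false (d : PySem.Dict String String) (k : String)
    (h : k ∉ d.keys) : d.contains k = false := by
  cases hc : d.contains k
  · rfl
  · exact absurd ((PySem.Dict.contains_iff_mem_keys d k).1 hc) h

-- erase filters the key out of the key list
theorem pv_erase_keys (d : PySem.Dict String String) (k : String) :
    (d.erase k).keys = d.keys.filter (fun x => !(x == k)) := by
  show (List.filter (fun p => !(p.1 == k)) d.items).map Prod.fst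
      = List.filter (fun x => !(x == k)) (d.items.map Prod.fst)
  rw [List.filter_map]
  rfl

-- erasing an absent key is a no-op
theorem pv_erase_of_not_mem (d : PySem.Dict String String) (k : String)
    (h : k ∉ d.keys) : d.erase k = d := by
  apply PySem.Dict.ext
  show List.filter (fun p => !(p.1 == k)) d.items = d.items
  apply List.filter_eq_self.2
  intro p hp
  have : p.1 ∈ d.keys := List.mem_map_of_mem hp
  simp only [Bool.not_eq_eq_eq_not, Bool.not_true, beq_eq_false_iff_ne, ne_eq]
  rintro rfl; exact h this

-- A's guarded deletion is plain erase
theorem pv_del_step_eq (d : PySem.Dict String String) (k : String) :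
    (if d.contains k then d.erase k else d) = d.erase k := by
  by_cases h : d.contains k
  · simp [h]
  · have hk : k ∉ d.keys := fun hm => h ((PySem.Dict.contains_iff_mem_keys d k).2 hm)
    simp [h, pv_erase_of_not_mem d k hk]

-- keys after the deletion fold: the stale keys filtered out
theorem pv_eraseFold_keys (ks : List String) (d : PySem.Dict String String) :
    (ks.foldl (fun d k => d.erase k) d).keys = d.keys.filter (fun x => decide (x ∉ ks)) := by
  induction ks generalizing d with
  | nil => simp
  | cons k ks ih =>
      simp only [List.foldl_cons, ih, pv_erase_keys, List.filter_filter]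
      apply List.filter_congr
      intro x _
      by_cases hx : x = k <;> by_cases hxs : x ∈ ks <;> simp [hx, hxs]

-- erase of a DIFFERENT key does not change a lookup
theorem pv_get?_erase_of_ne (d : PySem.Dict String String) (k k' : String)
    (h : k ≠ k') : (d.erase k').get? k = d.get? k := by
  show ((d.items.filter (fun p => !(p.1 == k'))).find? (fun p => p.1 == k)).map (fun p => p.2)
      = (d.items.find? (fun p => p.1 == k)).map (fun p => p.2)
  congr 1
  induction d.items with
  | nil => rfl
  | cons p t ih =>
      by_cases hp : p.1 = k
      · have h1 : (p.1 == k) = true := by simp [hp]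
        have h2 : (!(p.1 == k')) = true := by simp [hp]; exact h
        simp [h2, h1]
      · have h1 : (p.1 == k) = false := by simp [hp]
        by_cases hq : p.1 = k'
        · have hkk : (k' == k) = false := beq_eq_false_iff_ne.2 (fun e => h e.symm)
          simp [hq, ih, hkk]
        · have h2 : (!(p.1 == k')) = true := by simp [hq]
          simp [h2, h1, ih]

-- the erase fold does not change a lookup of a non-stale key
theorem pv_getD_eraseFold (ks : List String) (d : PySem.Dict String String) (k : String)
    (h : k ∉ ks) : (ks.foldl (fun d k => d.erase k) d).getD k "" = d.getD k "" := by
  induction ks generalizing d with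
  | nil => rfl
  | cons k' t ih =>
      simp only [List.foldl_cons]
      rw [ih _ (fun hm => h (List.mem_cons_of_mem k' hm))]
      simp only [PySem.Dict.getD_eq_get?_getD,
        pv_get?_erase_of_ne d k k' (fun he => h (he ▸ List.mem_cons_self))]

-- the parse fold: A's (dict, order) state is the dict paired with its key list
theorem pv_parse_inv (lines : List String) (d : PySem.Dict String String) :
    lines.foldl pvStepA (d, d.keys) = (lines.foldl pvDictStep d, (lines.foldl pvDictStep d).keys) := by
  induction lines generalizing d with
  | nil => rfl
  | cons line rest ih =>
      simp only [List.foldl_cons]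
      have hstep : pvStepA (d, d.keys) line = (pvDictStep d line, (pvDictStep d line).keys) := by
        unfold pvStepA pvDictStep
        by_cases hc : PySem.Str.isIn ":" line = true
        · simp only [if_pos hc]
          set k := PySem.Str.strip (((PySem.Str.splitMax? line ":" 1).getD []).getD 0 "")
          by_cases hk : k ∈ d.keys
          · rw [PySem.Dict.keys_insert_of_contains _ _
              ((PySem.Dict.contains_iff_mem_keys d k).2 hk)]
            simp [hk]
          · rw [PySem.Dict.keys_insert_of_not_contains _ _ (pv_contains_eq_false d k hk)]
            simp [hk]
        · simp only [if_neg hc]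
      rw [hstep, ih]

-- the dict parse fold is the insert fold over the collected pair list
theorem pv_parseStep_acc (lines : List String) (acc : List (String × String)) :
    lines.foldl pvParseStep acc = acc ++ lines.foldl pvParseStep [] := by
  induction lines generalizing acc with
  | nil => simp
  | cons line rest ih =>
      simp only [List.foldl_cons]
      rw [ih, ih (pvParseStep [] line)]
      unfold pvParseStep
      by_cases hc : PySem.Str.isIn ":" line = true
      · rw [if_pos hc, if_pos hc]; simp
      · rw [if_neg hc, if_neg hc]; simp

theorem pv_dict_eq_pairs (lines : List String) (d : PySem.Dict String String) :
    lines.foldl pvDictStep d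
      = (lines.foldl pvParseStep []).foldl (fun d p => d.insert p.1 p.2) d := by
  induction lines generalizing d with
  | nil => rfl
  | cons line rest ih =>
      simp only [List.foldl_cons]
      rw [ih, pv_parseStep_acc rest (pvParseStep [] line), List.foldl_append]
      have hstep : pvDictStep d line
          = (pvParseStep [] line).foldl (fun d p => d.insert p.1 p.2) d := by
        unfold pvDictStep pvParseStep
        by_cases hc : PySem.Str.isIn ":" line = true
        · rw [if_pos hc, if_pos hc]; rfl
        · rw [if_neg hc, if_neg hc]; rfl
      rw [hstep]

-- A's second serialization loop is dead: every remaining key is in `order`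
theorem pv_second_loop_dead (l : List (String × String)) (order : List String)
    (acc : List String) (h : ∀ p ∈ l, p.1 ∈ order) :
    l.foldl (fun acc p => if p.1 ∈ order then acc else acc ++ [p.1 ++ ": " ++ p.2]) acc = acc := by
  induction l generalizing acc with
  | nil => rfl
  | cons p rest ih =>
      simp only [List.foldl_cons, h p (List.mem_cons_self), if_pos]
      exact ih acc (fun q hq => h q (List.mem_cons_of_mem _ hq))

-- insert's key list matches A's conditional order append
theorem pv_keys_insert_cond (d : PySem.Dict String String) (k : String) (v : String) :
    (d.insert k v).keys = if k ∈ d.keys then d.keys else d.keys ++ [k] := by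
  by_cases hk : k ∈ d.keys
  · rw [PySem.Dict.keys_insert_of_contains _ _ ((PySem.Dict.contains_iff_mem_keys d k).2 hk)]
    simp [hk]
  · rw [PySem.Dict.keys_insert_of_not_contains _ _ (pv_contains_eq_false d k hk)]
    simp [hk]

-- A's second conditional order append (with its `is not None` conjunct) for a present value
theorem pv_ord2 (d1 : PySem.Dict String String) (la : String) (v : String) :
    (if "last_reconciled_amendment" ∉ d1.keys ∧ (some la ≠ none) then
        d1.keys ++ ["last_reconciled_amendment"] else d1.keys)
      = (d1.insert "last_reconciled_amendment" v).keys := by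
  rw [pv_keys_insert_cond]
  by_cases hm : "last_reconciled_amendment" ∈ d1.keys <;> simp [hm]

-- deletion + both serialization loops of A render the erased dict's items
theorem pv_tail' (d2 : PySem.Dict String String) (hnd2 : d2.keys.Nodup) :
    ((pvStaleKeys.foldl (fun d k => if d.contains k then d.erase k else d) d2).items.foldl
        (fun acc p => if p.1 ∈ d2.keys then acc else acc ++ [p.1 ++ ": " ++ p.2])
        (d2.keys.foldl (fun acc k =>
          if (pvStaleKeys.foldl (fun d k => if d.contains k then d.erase k else d) d2).contains k
          then acc ++ [k ++ ": " ++
            (pvStaleKeys.foldl (fun d k => if d.contains k then d.erase k else d) d2).getD k ""]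
          else acc) []))
    = ((pvStaleKeys.foldl (fun d k => d.erase k) d2).items.map (fun p => p.1 ++ ": " ++ p.2)) := by
  have hA : (fun (d : PySem.Dict String String) k => if d.contains k then d.erase k else d)
      = fun d k => d.erase k := funext fun d => funext fun k => pv_del_step_eq d k
  rw [hA]
  generalize hdf : pvStaleKeys.foldl (fun d k => d.erase k) d2 = df
  have hdfk : df.keys = d2.keys.filter (fun x => decide (x ∉ pvStaleKeys)) :=
    hdf ▸ pv_eraseFold_keys pvStaleKeys d2
  have hndf : df.keys.Nodup := hdfk ▸ hnd2.filter _
  rw [PySem.List.foldl_append_if (fun k => df.contains k)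
      (fun k => k ++ ": " ++ df.getD k "") d2.keys []]
  rw [pv_second_loop_dead _ _ _ (by
    intro p hp
    have hk : p.1 ∈ df.keys := List.mem_map_of_mem hp
    rw [hdfk] at hk
    exact (List.mem_filter.1 hk).1)]
  have hfilt : d2.keys.filter (fun k => df.contains k) = df.keys := by
    rw [hdfk]
    apply List.filter_congr
    intro x hx
    by_cases hs : x ∈ pvStaleKeys
    · have hc : df.contains x = false := pv_contains_eq_false df x (by
        rw [hdfk]
        intro hm
        have := (List.mem_filter.1 hm).2
        simp [hs] at this)
      simp [hc, hs]
    · have hc : df.contains x = true := (PySem.Dict.contains_iff_mem_keys df x).2 (by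
        rw [hdfk]
        exact List.mem_filter.2 ⟨hx, by simp [hs]⟩)
      simp [hc, hs]
  rw [List.nil_append, hfilt]
  rw [PySem.Dict.items_eq_map_keys df hndf "", List.map_map]
  rfl

-- pvDedup only looks at seen's membership
theorem pv_dedup_congr (s1 s2 : List String) (ks : List String)
    (h : ∀ x, x ∈ s1 ↔ x ∈ s2) : pvDedup s1 ks = pvDedup s2 ks := by
  induction ks generalizing s1 s2 with
  | nil => rfl
  | cons k t ih =>
      unfold pvDedup
      by_cases hk : k ∈ s1
      · rw [if_pos hk, if_pos ((h k).1 hk)]; exact ih s1 s2 h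
      · rw [if_neg hk, if_neg (fun hm => hk ((h k).2 hm))]
        exact congrArg _ (ih (k :: s1) (k :: s2) (by intro x; simp [h x]))

theorem pv_new_congr (s1 s2 : List String) (ks : List String)
    (h : ∀ x, x ∈ s1 ↔ x ∈ s2) : pvNew s1 ks = pvNew s2 ks := by
  induction ks generalizing s1 s2 with
  | nil => rfl
  | cons k t ih =>
      unfold pvNew
      by_cases hk : k ∈ s1
      · rw [if_pos hk, if_pos ((h k).1 hk)]; exact ih s1 s2 h
      · rw [if_neg hk, if_neg (fun hm => hk ((h k).2 hm))]
        have ht := ih (k :: s1) (k :: s2) (by intro x; simp [h x])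
        by_cases hs : k ∈ pvStaleKeys
        · rw [if_pos hs, if_pos hs, ht]
        · rw [if_neg hs, if_neg hs, ht]

-- pvNew is pvDedup with the stale filter
theorem pv_new_eq_filter (seen ks : List String) :
    pvNew seen ks = (pvDedup seen ks).filter (fun k => decide (k ∉ pvStaleKeys)) := by
  induction ks generalizing seen with
  | nil => rfl
  | cons k t ih =>
      unfold pvNew pvDedup
      by_cases hk : k ∈ seen
      · rw [if_pos hk, if_pos hk, ih]
      · rw [if_neg hk, if_neg hk]
        by_cases hs : k ∈ pvStaleKeys
        · rw [if_pos hs]; simp [hs, ih]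
        · rw [if_neg hs]; simp [hs, ih]

-- members of a pvDedup are members of the list
theorem pv_mem_dedup (seen ks : List String) (k : String)
    (h : k ∈ pvDedup seen ks) : k ∈ ks := by
  induction ks generalizing seen with
  | nil => exact absurd h (by simp [pvDedup])
  | cons k' t ih =>
      unfold pvDedup at h
      by_cases hk : k' ∈ seen
      · rw [if_pos hk] at h; exact List.mem_cons_of_mem _ (ih seen h)
      · rw [if_neg hk] at h
        rcases List.mem_cons.1 h with h | h
        · exact h ▸ List.mem_cons_self
        · exact List.mem_cons_of_mem _ (ih _ h)

-- the Set.add fold from any seen prefix appends pvDedup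
theorem pv_foldl_add_eq_dedup (ks seen : List String) :
    ks.foldl PySem.Set.add seen = seen ++ pvDedup seen ks := by
  induction ks generalizing seen with
  | nil => simp [pvDedup]
  | cons k t ih =>
      simp only [List.foldl_cons]
      unfold pvDedup
      by_cases hk : k ∈ seen
      · rw [PySem.Set.add_of_mem hk, if_pos hk, ih]
      · rw [PySem.Set.add_of_not_mem hk, if_neg hk, ih]
        rw [pv_dedup_congr (seen ++ [k]) (k :: seen) t (by intro x; simp; tauto)]
        simp

-- pvNew unfolding on a cons, stated for rewriting
theorem pv_new_cons (seen : List String) (k : String) (t : List String) :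
    pvNew seen (k :: t)
      = if k ∈ seen then pvNew seen t
        else if k ∈ pvStaleKeys then pvNew (k :: seen) t
        else k :: pvNew (k :: seen) t := rfl

-- B's serialization loop, characterised: it emits pvNew of the remaining keys
theorem pv_B_loop (keys : List String) (f : String → String) :
    ∀ (P2 : List (String × String)) (n : Nat) (acc : List String),
    keys.drop n = P2.map Prod.fst →
    (PySem.List.enumerate P2 (n : Int)).foldl (fun acc p =>
        if p.2.1 ∉ pvStaleKeys ∧ p.2.1 ∉ keys.take p.1.toNat then acc ++ [f p.2.1] else acc) acc
      = acc ++ (pvNew (keys.take n) (P2.map Prod.fst)).map f := by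
  intro P2
  induction P2 with
  | nil => intro n acc _; simp [PySem.List.enumerate_nil, pvNew]
  | cons p t ih =>
      intro n acc hd
      have hk1 : keys.take (n + 1) = keys.take n ++ [p.1] := by
        rw [List.take_add, hd]; rfl
      have hd' : keys.drop (n + 1) = t.map Prod.fst := by
        have h1 : keys.drop (n+1) = (keys.drop n).drop 1 := by
          rw [List.drop_drop]
        rw [h1, hd]; rfl
      rw [PySem.List.enumerate_cons, List.foldl_cons, List.map_cons, pv_new_cons]
      have hcast : ((n : Int) + 1) = ((n + 1 : Nat) : Int) := by push_cast; ring
      have htoNat : ((n : Int)).toNat = n := by simp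
      rw [htoNat, hcast]
      by_cases hseen : p.1 ∈ keys.take n
      · rw [if_neg (fun hx => hx.2 hseen), if_pos hseen, ih (n+1) acc hd']
        rw [pv_new_congr (keys.take (n+1)) (keys.take n) (t.map Prod.fst)
          (by intro x
              rw [hk1, List.mem_append, List.mem_singleton]
              constructor
              · rintro (hx | rfl)
                · exact hx
                · exact hseen
              · exact Or.inl)]
      · rw [if_neg hseen]
        by_cases hs : p.1 ∈ pvStaleKeys
        · rw [if_neg (fun hx => hx.1 hs), if_pos hs, ih (n+1) acc hd']
          rw [pv_new_congr (keys.take (n+1)) (p.1 :: keys.take n) (t.map Prod.fst)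
            (by intro x; rw [hk1]; simp; tauto)]
        · rw [if_pos ⟨hs, hseen⟩, if_neg hs, ih (n+1) (acc ++ [f p.1]) hd']
          rw [pv_new_congr (keys.take (n+1)) (p.1 :: keys.take n) (t.map Prod.fst)
            (by intro x; rw [hk1]; simp; tauto)]
          simp

-- last value in the pair list = lookup in the insert-fold dict (for present keys)
theorem pv_lastVal_eq_getD (P : List (String × String)) (k : String)
    (h : k ∈ P.map Prod.fst) :
    pvLastVal P k = (P.foldl (fun d p => d.insert p.1 p.2) PySem.Dict.empty).getD k "" := by
  induction P using List.reverseRecOn with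
  | nil => simp at h
  | append_singleton P p ih =>
      rw [List.foldl_append, List.foldl_cons, List.foldl_nil]
      unfold pvLastVal
      rw [List.reverse_append]
      simp only [List.reverse_cons, List.reverse_nil, List.nil_append, List.cons_append,
        List.find?_cons]
      by_cases hp : p.1 = k
      · have hb : (p.1 == k) = true := beq_iff_eq.2 hp
        simp [hp]
      · have hb : (p.1 == k) = false := beq_eq_false_iff_ne.2 hp
        simp only [hb, PySem.Dict.getD_insert, if_neg (fun he : k = p.1 => hp he.symm)]
        have hm : k ∈ P.map Prod.fst := by
          rw [List.map_append] at h
          rcases List.mem_append.1 h with h | h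
          · exact h
          · simp at h; exact absurd h.symm hp
        exact ih hm

-- ===== MAIN =====

-- both tails agree for ANY full pair list P (A: insert-fold dict, erase, two loops;
-- B: enumerate loop with first-occurrence filter and reverse-scan values); kv and order
-- are taken as parameters so the call sites need no rewriting inside the big goal
theorem pv_sides (P : List (String × String)) (kv : PySem.Dict String String)
    (order : List String)
    (hkvP : kv = P.foldl (fun d p => d.insert p.1 p.2) PySem.Dict.empty)
    (hordP : order = kv.keys) :
    PySem.Str.join "\n"
      ((pvStaleKeys.foldl (fun d k => if d.contains k then d.erase k else d) kv).items.foldl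
        (fun acc p => if p.1 ∈ order then acc else acc ++ [p.1 ++ ": " ++ p.2])
        (order.foldl (fun acc k =>
          if (pvStaleKeys.foldl (fun d k => if d.contains k then d.erase k else d) kv).contains k
          then acc ++ [k ++ ": " ++
            (pvStaleKeys.foldl (fun d k => if d.contains k then d.erase k else d) kv).getD k ""]
          else acc) []))
    = PySem.Str.join "\n"
      ((PySem.List.enumerate P 0).foldl (fun acc p =>
        if p.2.1 ∉ pvStaleKeys ∧ p.2.1 ∉ (P.map Prod.fst).take p.1.toNat then
          acc ++ [p.2.1 ++ ": " ++ pvLastVal P p.2.1]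
        else acc) []) := by
  subst hordP
  congr 1
  set keys := P.map Prod.fst with hkeys
  have hempty : (PySem.Dict.empty : PySem.Dict String String).keys = [] := rfl
  have hnkv : kv.keys.Nodup := by
    rw [hkvP]
    exact PySem.Dict.nodup_keys_foldl_insert_key P Prod.fst (fun _ x => x.2)
      PySem.Dict.empty (by rw [hempty]; exact List.nodup_nil)
  rw [pv_tail' kv hnkv]
  set df := pvStaleKeys.foldl (fun d k => d.erase k) kv with hdf
  have hB := pv_B_loop keys (fun k => k ++ ": " ++ pvLastVal P k) P 0 []
    (by rw [List.drop_zero])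
  rw [show ((0 : Nat) : Int) = (0 : Int) by simp] at hB
  rw [hB, List.take_zero, List.nil_append]
  have hkvkeys : kv.keys = pvDedup [] keys := by
    rw [hkvP]
    rw [PySem.Dict.keys_foldl_insert_key P Prod.fst (fun _ x => x.2) PySem.Dict.empty]
    rw [hempty, ← hkeys]
    show keys.foldl PySem.Set.add [] = pvDedup [] keys
    rw [pv_foldl_add_eq_dedup keys []]
    rfl
  have hdfkeys : df.keys = pvNew [] keys := by
    rw [hdf, pv_eraseFold_keys, hkvkeys, pv_new_eq_filter]
  have hndf : df.keys.Nodup := by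
    rw [hdf, pv_eraseFold_keys]; exact hnkv.filter _
  rw [PySem.Dict.items_eq_map_keys df hndf "", List.map_map, hdfkeys]
  apply List.map_congr_left
  intro k hk
  have hk' : k ∈ pvDedup [] keys ∧ k ∉ pvStaleKeys := by
    rw [pv_new_eq_filter] at hk
    have := List.mem_filter.1 hk
    exact ⟨this.1, by simpa using this.2⟩
  have hkkeys : k ∈ keys := pv_mem_dedup [] keys k hk'.1
  show k ++ ": " ++ df.getD k "" = k ++ ": " ++ pvLastVal P k
  rw [hdf, pv_getD_eraseFold pvStaleKeys kv k hk'.2, hkvP,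
    ← pv_lastVal_eq_getD P k hkkeys]

theorem pv_main (frontmatter new_hash : String) (last_amendment : Option String) :
    upsert_amendments_hash frontmatter new_hash last_amendment
      = upsert_amendments_hash_alt frontmatter new_hash last_amendment := by
  unfold upsert_amendments_hash upsert_amendments_hash_alt
  dsimp only
  have hempty : (PySem.Dict.empty : PySem.Dict String String).keys = [] := rfl
  have hinv := pv_parse_inv (PySem.Str.splitlines frontmatter) PySem.Dict.empty
  rw [hempty] at hinv
  rw [hinv]
  dsimp only
  set lines := PySem.Str.splitlines frontmatter with hlines
  set D0 := lines.foldl pvDictStep PySem.Dict.empty with hD0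
  set P0 := lines.foldl pvParseStep [] with hP0
  have hD0P : D0 = P0.foldl (fun d p => d.insert p.1 p.2) PySem.Dict.empty :=
    pv_dict_eq_pairs lines PySem.Dict.empty
  cases last_amendment with
  | none =>
      rw [if_neg (by simp)]
      dsimp only
      set P : List (String × String) := P0 ++ [("amendments_hash", "\"" ++ new_hash ++ "\"")]
        with hP
      have hkv : D0.insert "amendments_hash" ("\"" ++ new_hash ++ "\"")
          = P.foldl (fun d p => d.insert p.1 p.2) PySem.Dict.empty := by
        rw [hP, List.foldl_append, ← hD0P]; rfl
      exact pv_sides P _ _ hkv (pv_keys_insert_cond D0 _ _).symm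
  | some la =>
      dsimp only
      set P : List (String × String) := (P0 ++ [("amendments_hash", "\"" ++ new_hash ++ "\"")])
        ++ [("last_reconciled_amendment", "\"" ++ la ++ "\"")] with hP
      have hkv : (D0.insert "amendments_hash" ("\"" ++ new_hash ++ "\"")).insert
            "last_reconciled_amendment" ("\"" ++ la ++ "\"")
          = P.foldl (fun d p => d.insert p.1 p.2) PySem.Dict.empty := by
        rw [hP, List.foldl_append, List.foldl_append, ← hD0P]; rfl
      have hord : (if "last_reconciled_amendment" ∉
            (if "amendments_hash" ∈ D0.keys then D0.keys else D0.keys ++ ["amendments_hash"]) ∧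
            (some la ≠ none) then
            (if "amendments_hash" ∈ D0.keys then D0.keys else D0.keys ++ ["amendments_hash"]) ++
              ["last_reconciled_amendment"]
          else (if "amendments_hash" ∈ D0.keys then D0.keys else D0.keys ++ ["amendments_hash"]))
          = ((D0.insert "amendments_hash" ("\"" ++ new_hash ++ "\"")).insert
              "last_reconciled_amendment" ("\"" ++ la ++ "\"")).keys := by
        have h1 : (if "amendments_hash" ∈ D0.keys then D0.keys
              else D0.keys ++ ["amendments_hash"])
            = (D0.insert "amendments_hash" ("\"" ++ new_hash ++ "\"")).keys :=
          (pv_keys_insert_cond D0 _ _).symm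
        rw [h1, pv_ord2]
      exact pv_sides P _ _ hkv hord

-- ===== VERDICT (by name: the statement is the Claim_ definition above) =====
theorem upsert_amendments_hash_spec : Claim_equal_upsert_amendments_hash := by
  intro frontmatter new_hash last_amendment _
  exact pv_main frontmatter new_hash last_amendment
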